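-- pv_equiv track=rewrite | github.com/huber-th/AdventOfCode | 2023/day2/day2.py | findMinCubesPossible
-- ===== SOURCE A (Python) =====
-- def findMinCubesPossible(draws):
--     r=0
--     g=0
--     b=0
--     for d in draws:
--         blocks = d.split(',')
--         for bl in blocks:
--             colour = bl.split(' ')
--             if colour[1] == 'red':
--                 if int(colour[0]) > r:
--                     r = int(colour[0])
--             if colour[1] == 'green':
--                 if int(colour[0]) > g:
--                     g = int(colour[0])
--             if colour[1] == 'blue':
--                 if int(colour[0]) > b:
--                     b = int(colour[0])
--     return [r,g,b]
-- ===== SOURCE B (Python) =====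
-- def findMinCubesPossible(draws):
--     blocks = [bl.split(' ') for d in draws for bl in d.split(',')]
--     def best(colour):
--         return max([0] + [int(t[0]) for t in blocks if t[1] == colour])
--     return [best('red'), best('green'), best('blue')]
-- ===== Notes on version B (the rewrite author's own statement) =====
-- stated objective: alternative
-- what changed: A keeps three running maxima updated online while scanning draws; B first flattens all draws into one list of split token blocks, then computes each colour's answer independently as max([0] + [int(t[0]) for t in blocks if t[1] == colour]) - a collect-then-reduce decomposition instead of an online running-max loop.
import Mathlib
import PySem

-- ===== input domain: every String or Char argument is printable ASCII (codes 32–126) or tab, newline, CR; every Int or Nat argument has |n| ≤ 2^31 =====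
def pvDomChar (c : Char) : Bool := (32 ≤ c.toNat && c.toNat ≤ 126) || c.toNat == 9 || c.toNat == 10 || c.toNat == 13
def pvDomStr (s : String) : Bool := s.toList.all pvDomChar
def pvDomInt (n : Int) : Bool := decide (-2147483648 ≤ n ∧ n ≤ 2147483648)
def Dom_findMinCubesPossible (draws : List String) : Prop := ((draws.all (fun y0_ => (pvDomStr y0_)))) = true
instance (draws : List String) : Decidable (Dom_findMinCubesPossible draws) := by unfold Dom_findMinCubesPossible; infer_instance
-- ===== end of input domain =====

-- B replaces A's online running-max triple by flatten-all-blocks then three filter/map/max passes (objective: alternative decomposition, same cost).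

-- shared primitive: s.split(sep) with sep ≠ "" (split? is some there; exact via PySem.Str.split?)
def pvSplit (s sep : String) : List String := (PySem.Str.split? s sep).getD []

-- ===== PORT A =====
def pvAstep (st : Int × Int × Int) (bl : String) : Int × Int × Int :=
  let colour := pvSplit bl " "
  let c1 := PySem.List.pyGetD colour 1 ""            -- colour[1]; IndexError excluded by Pre_
  let c0 : Int := (PySem.Int.ofStr? (PySem.List.pyGetD colour 0 "")).getD 0   -- int(colour[0]); ValueError excluded by Pre_
  let r := st.1
  let g := st.2.1
  let b := st.2.2
  let r := if c1 = "red" then (if c0 > r then c0 else r) else r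
  let g := if c1 = "green" then (if c0 > g then c0 else g) else g
  let b := if c1 = "blue" then (if c0 > b then c0 else b) else b
  (r, g, b)

def findMinCubesPossible (draws : List String) : List Int :=
  let st := draws.foldl (fun st d => (pvSplit d ",").foldl pvAstep st) (0, 0, 0)
  [st.1, st.2.1, st.2.2]

-- ===== PORT B =====
def findMinCubesPossible_alt (draws : List String) : List Int :=
  let blocks := draws.flatMap (fun d => (pvSplit d ",").map (fun bl => pvSplit bl " "))
  let best := fun (colour : String) =>
    (PySem.List.max? ((0 : Int) ::
       (blocks.filter (fun t => PySem.List.pyGetD t 1 "" == colour)).map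
         (fun t => (PySem.Int.ofStr? (PySem.List.pyGetD t 0 "")).getD 0)) (fun y => y)).getD 0
  [best "red", best "green", best "blue"]

-- ===== PRECONDITION & SPEC =====
-- Pre_ excludes exactly the inputs where Python A raises: a block with no ' ' (IndexError on colour[1])
-- or a recognized colour whose count token is not int-parsable (ValueError).
def Pre_findMinCubesPossible (draws : List String) : Prop :=
  ∀ d ∈ draws, ∀ bl ∈ pvSplit d ",",
    2 ≤ (pvSplit bl " ").length ∧
    (PySem.List.pyGetD (pvSplit bl " ") 1 "" ∈ (["red", "green", "blue"] : List String) →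
      (PySem.Int.ofStr? (PySem.List.pyGetD (pvSplit bl " ") 0 "")).isSome = true)
instance (draws : List String) : Decidable (Pre_findMinCubesPossible draws) := by
  unfold Pre_findMinCubesPossible; infer_instance

def pvWitness_findMinCubesPossible : List String := ["3 red,4 blue", "2 green,12 red"]

def Spec_findMinCubesPossible (draws : List String) (out : List Int) : Prop := out = findMinCubesPossible_alt draws
instance (draws : List String) (out : List Int) : Decidable (Spec_findMinCubesPossible draws out) := by unfold Spec_findMinCubesPossible; infer_instance

-- ===== CLAIM (what is proved, stated in full; the proofs are below) =====
def Claim_equal_findMinCubesPossible : Prop := ∀ (draws : List String), Dom_findMinCubesPossible draws → Pre_findMinCubesPossible draws → Spec_findMinCubesPossible draws (findMinCubesPossible draws)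

-- ===== LEMMAS AND PROOFS =====

def pvVal (t : List String) : Int := (PySem.Int.ofStr? (PySem.List.pyGetD t 0 "")).getD 0

def pvSel (c : String) (ts : List (List String)) : List Int :=
  (ts.filter (fun t => PySem.List.pyGetD t 1 "" == c)).map pvVal

-- A's inner step on an already-split block
def pvTstep (st : Int × Int × Int) (t : List String) : Int × Int × Int :=
  let c1 := PySem.List.pyGetD t 1 ""
  let c0 := pvVal t
  let r := if c1 = "red" then (if c0 > st.1 then c0 else st.1) else st.1
  let g := if c1 = "green" then (if c0 > st.2.1 then c0 else st.2.1) else st.2.1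
  let b := if c1 = "blue" then (if c0 > st.2.2 then c0 else st.2.2) else st.2.2
  (r, g, b)

theorem pvFoldT (ts : List (List String)) :
    ∀ r g b : Int, ts.foldl pvTstep (r, g, b) =
      ((pvSel "red" ts).foldl max r, (pvSel "green" ts).foldl max g, (pvSel "blue" ts).foldl max b) := by
  induction ts with
  | nil => intro r g b; simp [pvSel]
  | cons t ts ih =>
    intro r g b
    have hstep : pvTstep (r, g, b) t =
        (if PySem.List.pyGetD t 1 "" = "red" then max r (pvVal t) else r,
         if PySem.List.pyGetD t 1 "" = "green" then max g (pvVal t) else g,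
         if PySem.List.pyGetD t 1 "" = "blue" then max b (pvVal t) else b) := by
      simp only [pvTstep]
      refine Prod.ext ?_ (Prod.ext ?_ ?_) <;> simp <;> split_ifs <;> omega
    have hsel : ∀ c m, (pvSel c (t :: ts)).foldl max m =
        (pvSel c ts).foldl max (if PySem.List.pyGetD t 1 "" = c then max m (pvVal t) else m) := by
      intro c m
      simp only [pvSel, List.filter_cons]
      by_cases h : PySem.List.pyGetD t 1 "" = c <;> simp [h]
    simp only [List.foldl_cons, hstep, ih, hsel]

theorem pvFold_blocks (draws : List String) (init : Int × Int × Int) :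
    draws.foldl (fun st d => (pvSplit d ",").foldl pvAstep st) init =
      (draws.flatMap (fun d => (pvSplit d ",").map (fun bl => pvSplit bl " "))).foldl pvTstep init := by
  induction draws generalizing init with
  | nil => rfl
  | cons d draws ih =>
    simp only [List.foldl_cons, List.flatMap_cons, List.foldl_append, ih, List.foldl_map]
    rfl

-- ===== VERDICT (by name: the statement is the Claim_ definition above) =====
theorem findMinCubesPossible_spec : Claim_equal_findMinCubesPossible := by
  intro draws _ _
  show findMinCubesPossible draws = findMinCubesPossible_alt draws
  simp only [findMinCubesPossible, findMinCubesPossible_alt, pvFold_blocks]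
  rw [pvFoldT]
  simp only [PySem.List.max?_id_cons, pvSel, Option.getD_some, List.cons.injEq, and_true]
  exact ⟨rfl, rfl, rfl⟩
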